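-- pv_equiv track=rewrite | github.com/katsele/movify-hackathon | workers/connectors/ted_procurement.py | _pick_lang
-- ===== SOURCE A (Python) =====
-- from typing import Any, Iterable
--
-- def _pick_lang(field: Any, prefer: Iterable[str] = ("eng", "fra", "nld", "deu")) -> str | None:
--     """TED multilingual fields come as `{"nld": [...], "fra": [...]}`.
--
--     Pick the first non-empty value in the preferred language order. If none
--     of the preferred languages are present, fall back to any language.
--     """
--     if not isinstance(field, dict):
--         return None
--     for lang in prefer:
--         value = field.get(lang)
--         if value:
--             return value[0] if isinstance(value, list) else str(value)
--     for value in field.values():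
--         if value:
--             return value[0] if isinstance(value, list) else str(value)
--     return None
-- ===== SOURCE B (Python) =====
-- def _pick_lang(field, prefer=("eng", "fra", "nld", "deu")):
--     """Single selection pass over field.items(): give every item a numeric
--     rank (its index in prefer via a rank table built once, or
--     len(prefer)+position for the rest) and keep the truthy value with the
--     smallest rank."""
--     if not isinstance(field, dict):
--         return None
--     prefer = list(prefer)
--     rank_of = {}
--     i = 0
--     for lang in prefer:
--         rank_of.setdefault(lang, i)
--         i += 1
--     best = None
--     best_rank = None
--     for pos, (key, value) in enumerate(field.items()):
--         if not value:
--             continue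
--         rank = rank_of.get(key)
--         if rank is None:
--             rank = len(prefer) + pos
--         if best_rank is None or rank < best_rank:
--             best_rank = rank
--             best = value
--     if best is None:
--         return None
--     return best[0] if isinstance(best, list) else str(best)
-- ===== Notes on version B (the rewrite author's own statement) =====
-- stated objective: alternative
-- what changed: Replaces A's two sequential probing loops (preferred languages via .get, then a fallback scan of all values) by a rank table built once from prefer plus a single selection pass over field.items() that keeps the truthy value of minimal rank (index in prefer, or len(prefer)+position otherwise).
import Mathlib
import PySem

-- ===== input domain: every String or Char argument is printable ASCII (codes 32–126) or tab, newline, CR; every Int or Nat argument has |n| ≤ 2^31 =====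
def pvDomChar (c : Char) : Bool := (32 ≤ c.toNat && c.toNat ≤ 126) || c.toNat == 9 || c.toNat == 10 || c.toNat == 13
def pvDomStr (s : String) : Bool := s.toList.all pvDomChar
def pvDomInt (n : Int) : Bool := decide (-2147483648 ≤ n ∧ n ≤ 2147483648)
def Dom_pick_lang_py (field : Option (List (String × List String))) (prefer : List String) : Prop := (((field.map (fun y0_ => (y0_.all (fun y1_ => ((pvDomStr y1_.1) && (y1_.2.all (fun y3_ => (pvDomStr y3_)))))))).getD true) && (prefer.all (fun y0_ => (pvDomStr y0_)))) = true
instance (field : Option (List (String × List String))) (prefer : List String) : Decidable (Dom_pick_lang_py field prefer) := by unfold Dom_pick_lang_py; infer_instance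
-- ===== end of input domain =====

-- B replaces A's two sequential probing loops by a single selection pass over the dict items
-- that keeps the truthy value of minimal rank (index in prefer, else len(prefer)+position); same task, different algorithm.


-- ===== PORT A =====
-- A, phase 2: 'for value in field.values(): if value: return value[0]' (values are lists here)
def pickLangA2 (vals : List (List String)) : Option String :=
  match vals with
  | [] => none
  | [] :: rest => pickLangA2 rest
  | (v :: _) :: _ => some v

-- A, phase 1: 'for lang in prefer: value = field.get(lang); if value: return value[0]', then fall to phase 2
def pickLangA1 (d : PySem.Dict String (List String)) (prefer : List String) : Option String :=
  match prefer with
  | [] => pickLangA2 d.values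
  | lang :: rest =>
    match d.get? lang with
    | some (v :: _) => some v
    | _ => pickLangA1 d rest

def pick_lang_py (field : Option (List (String × List String))) (prefer : List String) : Option String :=
  match field with
  | none => none               -- not a dict
  | some pairs => pickLangA1 (PySem.Dict.ofList pairs) prefer

-- ===== PORT B =====
-- B's rank table: 'rank_of = {}; i = 0; for lang in prefer: rank_of.setdefault(lang, i); i += 1'
def pickLangRankMap (prefer : List String) : PySem.Dict String Nat :=
  (prefer.foldl (fun di lang => (di.1.setdefault lang di.2, di.2 + 1))
    (PySem.Dict.empty, 0)).1

-- B's loop: 'for pos, (key, value) in enumerate(field.items()): …' keeping (best_rank, best)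
def pickLangBest (rankOf : PySem.Dict String Nat) (plen : Nat) (pos : Nat)
    (best : Option (Nat × List String)) :
    List (String × List String) → Option (Nat × List String)
  | [] => best
  | (key, value) :: rest =>
    if value.isEmpty then pickLangBest rankOf plen (pos + 1) best rest
    else
      let r := match rankOf.get? key with  -- 'rank = rank_of.get(key)', default len(prefer)+pos
        | some i => i
        | none => plen + pos
      match best with
      | none => pickLangBest rankOf plen (pos + 1) (some (r, value)) rest
      | some (br, bv) =>
        if r < br then pickLangBest rankOf plen (pos + 1) (some (r, value)) rest
        else pickLangBest rankOf plen (pos + 1) (some (br, bv)) rest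

def pick_lang_py_alt (field : Option (List (String × List String))) (prefer : List String) : Option String :=
  match field with
  | none => none               -- not a dict
  | some pairs =>
    match pickLangBest (pickLangRankMap prefer) prefer.length 0 none
        (PySem.Dict.ofList pairs).items with
    | none => none
    | some (_, v) => v.head?   -- 'best[0]'; best is only ever set to a non-empty (truthy) list

-- ===== PRECONDITION & SPEC =====
def Spec_pick_lang_py (field : Option (List (String × List String))) (prefer : List String) (out : Option String) : Prop := out = pick_lang_py_alt field prefer
instance (field : Option (List (String × List String))) (prefer : List String) (out : Option String) : Decidable (Spec_pick_lang_py field prefer out) := by unfold Spec_pick_lang_py; infer_instance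

-- ===== CLAIM (what is proved, stated in full; the proofs are below) =====
def Claim_equal_pick_lang_py : Prop := ∀ (field : Option (List (String × List String))) (prefer : List String), Dom_pick_lang_py field prefer → Spec_pick_lang_py field prefer (pick_lang_py field prefer)

-- ===== LEMMAS AND PROOFS =====

-- proof-side rank: the same rank as B's table, spelled with prefer.index
def pickLangRank (prefer : List String) (pos : Nat) (key : String) : Nat :=
  match PySem.List.index? prefer key with
  | some i => i
  | none => prefer.length + pos

-- proof-side copy of B's selection loop with the rank inlined via pickLangRank
def pickLangBestP (prefer : List String) (pos : Nat) (best : Option (Nat × List String)) :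
    List (String × List String) → Option (Nat × List String)
  | [] => best
  | (key, value) :: rest =>
    if value.isEmpty then pickLangBestP prefer (pos + 1) best rest
    else
      let r := pickLangRank prefer pos key
      match best with
      | none => pickLangBestP prefer (pos + 1) (some (r, value)) rest
      | some (br, bv) =>
        if r < br then pickLangBestP prefer (pos + 1) (some (r, value)) rest
        else pickLangBestP prefer (pos + 1) (some (br, bv)) rest

-- B's rank table looked up is exactly prefer.index (first occurrence wins via setdefault)
theorem rankMap_get?_aux (prefer : List String) :
    ∀ (d : PySem.Dict String Nat) (i : Nat) (k : String),
      ((prefer.foldl (fun di lang => (di.1.setdefault lang di.2, di.2 + 1)) (d, i)).1).get? k =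
        match d.get? k with
        | some v => some v
        | none => (PySem.List.index? prefer k).map (· + i) := by
  induction prefer with
  | nil =>
    intro d i k
    cases hd : d.get? k <;> simp [hd, PySem.List.index?_eq_idxOf?]
  | cons lang rest ih =>
    intro d i k
    simp only [List.foldl_cons]
    rw [ih]
    by_cases hk : k = lang
    · subst hk
      cases hd : d.get? k with
      | some v => simp [PySem.Dict.get?_setdefault_self, hd]
      | none =>
        simp [PySem.Dict.get?_setdefault_self, hd, PySem.List.index?_eq_idxOf?,
          List.idxOf?_cons]
    · have hset : (d.setdefault lang i).get? k = d.get? k := by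
        rw [PySem.Dict.get?_setdefault_of_ne]; exact hk
      simp only [hset]
      cases hd : d.get? k with
      | some v => simp
      | none =>
        simp only [PySem.List.index?_eq_idxOf?, List.idxOf?_cons, beq_iff_eq,
          if_neg (Ne.symm hk)]
        cases List.idxOf? k rest with
        | none => simp
        | some j => simp; omega

theorem rankMap_get? (prefer : List String) (k : String) :
    (pickLangRankMap prefer).get? k = PySem.List.index? prefer k := by
  unfold pickLangRankMap
  rw [rankMap_get?_aux]
  simp only [PySem.Dict.get?_empty]
  cases PySem.List.index? prefer k <;> simp

-- B's loop with the rank table is the proof-side loop with prefer.index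
theorem pickLangBest_eq_P (prefer : List String) :
    ∀ (its : List (String × List String)) (pos : Nat) (best : Option (Nat × List String)),
      pickLangBest (pickLangRankMap prefer) prefer.length pos best its =
        pickLangBestP prefer pos best its := by
  intro its
  induction its with
  | nil => intro pos best; simp [pickLangBest, pickLangBestP]
  | cons p rest ih =>
    intro pos best
    obtain ⟨key, value⟩ := p
    by_cases hve : value.isEmpty
    · simp only [pickLangBest, pickLangBestP, hve, ite_true]
      exact ih _ _
    · have hr : (match (pickLangRankMap prefer).get? key with
                 | some i => i
                 | none => prefer.length + pos) = pickLangRank prefer pos key := by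
        simp only [rankMap_get?]; rfl
      simp only [pickLangBest, pickLangBestP, hve, Bool.false_eq_true, ite_false, hr]
      cases best with
      | none => exact ih _ _
      | some q =>
        obtain ⟨br, bv⟩ := q
        by_cases hlt : pickLangRank prefer pos key < br <;> simp only [hlt, ite_true, ite_false] <;>
          exact ih _ _

-- how a non-none accumulator combines with the result of the rest of the loop
def pickCombine (b : Nat × List String) (o : Option (Nat × List String)) : Nat × List String :=
  match o with
  | none => b
  | some (r, v) => if r < b.1 then (r, v) else b

-- accumulator elimination: running the loop with a non-none accumulator
theorem pickLangBestP_acc (prefer : List String) :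
    ∀ (its : List (String × List String)) (pos : Nat) (b : Nat × List String),
      pickLangBestP prefer pos (some b) its =
        some (pickCombine b (pickLangBestP prefer pos none its)) := by
  intro its
  induction its with
  | nil => intro pos b; simp [pickLangBestP, pickCombine]
  | cons p rest ih =>
    intro pos b
    obtain ⟨key, value⟩ := p
    by_cases hv : value.isEmpty
    · simp [pickLangBestP, hv, ih]
    · obtain ⟨br, bv⟩ := b
      simp only [pickLangBestP, hv, Bool.false_eq_true, ite_false]
      set r := pickLangRank prefer pos key with hr
      rw [ih, ih]
      cases pickLangBestP prefer (pos + 1) none rest with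
      | none => by_cases hlt : r < br <;> simp [pickCombine, hlt]
      | some q =>
        obtain ⟨r', v'⟩ := q
        by_cases h1 : r' < r
        · by_cases hlt : r < br
          · have h2 : r' < br := by omega
            simp [pickCombine, h1, hlt, h2]
          · simp [pickCombine, h1, hlt]
        · by_cases hlt : r < br
          · simp [pickCombine, h1, hlt]
          · have h4 : ¬ r' < br := by omega
            simp [pickCombine, h1, hlt, h4]

-- with an empty prefer list every rank is the position, so results are ≥ the start position
theorem pickLangBestP_nil_lb :
    ∀ (its : List (String × List String)) (pos r : Nat) (v : List String),
      pickLangBestP [] pos none its = some (r, v) → pos ≤ r := by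
  intro its
  induction its with
  | nil => intro pos r v h; simp [pickLangBestP] at h
  | cons p rest ih =>
    intro pos r v h
    obtain ⟨key, value⟩ := p
    by_cases hv : value.isEmpty
    · simp only [pickLangBestP, hv, ite_true] at h
      exact Nat.le_of_succ_le (ih (pos + 1) r v h)
    · simp only [pickLangBestP, hv, Bool.false_eq_true, ite_false] at h
      have hrk : pickLangRank [] pos key = pos := by
        simp [pickLangRank, PySem.List.index?]
      rw [hrk, pickLangBestP_acc] at h
      cases hrest : pickLangBestP [] (pos + 1) none rest with
      | none => rw [hrest] at h; simp [pickCombine] at h; omega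
      | some q =>
        obtain ⟨r', v'⟩ := q
        have hr' : pos + 1 ≤ r' := ih (pos + 1) r' v' hrest
        rw [hrest] at h
        simp only [pickCombine, Option.some.injEq] at h
        by_cases h1 : r' < pos
        · omega
        · simp [h1] at h; omega

-- base case: with no preferred languages B's selection is A's first-truthy-value scan
theorem pickLangBestP_nil (its : List (String × List String)) :
    ∀ pos : Nat,
      (match pickLangBestP [] pos none its with
       | none => none
       | some (_, v) => v.head?) = pickLangA2 (its.map (·.2)) := by
  induction its with
  | nil => intro pos; simp [pickLangBestP, pickLangA2]
  | cons p rest ih =>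
    intro pos
    obtain ⟨key, value⟩ := p
    cases value with
    | nil => simpa [pickLangBestP, pickLangA2] using ih (pos + 1)
    | cons x xs =>
      have hrk : pickLangRank [] pos key = pos := by
        simp [pickLangRank, PySem.List.index?]
      simp only [pickLangBestP, List.isEmpty_cons, Bool.false_eq_true, ite_false, hrk,
        pickLangBestP_acc, List.map_cons, pickLangA2]
      cases hrest : pickLangBestP [] (pos + 1) none rest with
      | none => simp [pickCombine]
      | some q =>
        obtain ⟨r', v'⟩ := q
        have : pos + 1 ≤ r' := pickLangBestP_nil_lb rest (pos + 1) r' v' hrest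
        have hnlt : ¬ r' < pos := by omega
        simp [pickCombine, hnlt]

-- rank under (lang :: restp) for the key lang itself is 0
theorem pickLangRank_cons_self (lang : String) (restp : List String) (pos : Nat) :
    pickLangRank (lang :: restp) pos lang = 0 := by
  simp [pickLangRank, List.idxOf?_cons]

-- rank under (lang :: restp) for any other key is one more than under restp
theorem pickLangRank_cons_of_ne (lang : String) (restp : List String) (pos : Nat) (key : String)
    (h : key ≠ lang) : pickLangRank (lang :: restp) pos key = pickLangRank restp pos key + 1 := by
  simp only [pickLangRank, PySem.List.index?_eq_idxOf?, List.idxOf?_cons, beq_iff_eq,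
    if_neg (Ne.symm h)]
  cases List.idxOf? key restp with
  | none => simp [List.length_cons]; omega
  | some i => simp

-- if the (unique) item for the first preferred language is truthy, B selects exactly it
theorem pickLangBestP_hit (lang : String) (restp : List String) (v : List String) (hv : v ≠ []) :
    ∀ (its : List (String × List String)) (pos : Nat),
      (its.map (·.1)).Nodup → (lang, v) ∈ its →
      pickLangBestP (lang :: restp) pos none its = some (0, v) := by
  intro its
  induction its with
  | nil => intro pos _ hmem; cases hmem
  | cons p rest ih =>
    intro pos hnd hmem
    obtain ⟨key, value⟩ := p
    simp only [List.map_cons, List.nodup_cons] at hnd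
    by_cases hkl : key = lang
    · subst hkl
      have hveq : value = v := by
        rcases List.mem_cons.mp hmem with heq | hmem'
        · exact ((Prod.ext_iff.mp heq.symm).2)
        · exact absurd (by simpa using List.mem_map_of_mem hmem' (f := (·.1))) hnd.1
      subst hveq
      have hve : value.isEmpty = false := by
        cases value with
        | nil => exact absurd rfl hv
        | cons _ _ => rfl
      simp only [pickLangBestP, hve, Bool.false_eq_true, ite_false, pickLangRank_cons_self,
        pickLangBestP_acc]
      cases pickLangBestP (key :: restp) (pos + 1) none rest with
      | none => simp [pickCombine]
      | some q => obtain ⟨r', v'⟩ := q; simp [pickCombine]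
    · have hmem' : (lang, v) ∈ rest := by
        rcases List.mem_cons.mp hmem with heq | hmem'
        · exact absurd ((Prod.ext_iff.mp heq).1.symm) hkl
        · exact hmem'
      by_cases hve : value.isEmpty
      · simp only [pickLangBestP, hve, ite_true]
        exact ih (pos + 1) hnd.2 hmem'
      · have hpos : 0 < pickLangRank (lang :: restp) pos key := by
          rw [pickLangRank_cons_of_ne lang restp pos key hkl]; omega
        simp only [pickLangBestP, hve, Bool.false_eq_true, ite_false, pickLangBestP_acc,
          ih (pos + 1) hnd.2 hmem']
        simp [pickCombine, hpos]

-- if every item keyed by lang is falsy, lang only shifts all ranks up by one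
theorem pickLangBestP_shift (lang : String) (restp : List String) :
    ∀ (its : List (String × List String)),
      (∀ p ∈ its, p.1 = lang → p.2 = []) →
      ∀ (pos : Nat) (b : Option (Nat × List String)),
        pickLangBestP (lang :: restp) pos (b.map (fun rv => (rv.1 + 1, rv.2))) its =
          (pickLangBestP restp pos b its).map (fun rv => (rv.1 + 1, rv.2)) := by
  intro its
  induction its with
  | nil => intro _ pos b; simp [pickLangBestP]
  | cons p rest ih =>
    intro hfal pos b
    obtain ⟨key, value⟩ := p
    have hrest : ∀ p ∈ rest, p.1 = lang → p.2 = [] :=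
      fun p hp => hfal p (List.mem_cons_of_mem _ hp)
    by_cases hkey : key = lang
    · have : value = [] := hfal (key, value) List.mem_cons_self hkey
      subst this
      simp only [pickLangBestP, List.isEmpty_nil, ite_true]
      exact ih hrest (pos + 1) b
    · by_cases hve : value.isEmpty
      · simp only [pickLangBestP, hve, ite_true]
        exact ih hrest (pos + 1) b
      · have hrk := pickLangRank_cons_of_ne lang restp pos key hkey
        cases b with
        | none =>
          simp only [pickLangBestP, hve, Bool.false_eq_true, ite_false, Option.map_none, hrk]
          exact ih hrest (pos + 1) (some (pickLangRank restp pos key, value))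
        | some q =>
          obtain ⟨br, bv⟩ := q
          simp only [pickLangBestP, hve, Bool.false_eq_true, ite_false, Option.map_some, hrk]
          by_cases hlt : pickLangRank restp pos key < br
          · have h1 : pickLangRank restp pos key + 1 < br + 1 := by omega
            simp only [hlt, h1, ite_true]
            exact ih hrest (pos + 1) (some (pickLangRank restp pos key, value))
          · have h1 : ¬ pickLangRank restp pos key + 1 < br + 1 := by omega
            simp only [hlt, h1, ite_false]
            exact ih hrest (pos + 1) (some (br, bv))

-- main: A's two phases equal B's single min-rank selection over the dict items
theorem pickLang_main (d : PySem.Dict String (List String)) (hnd : d.keys.Nodup) :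
    ∀ prefer : List String,
      pickLangA1 d prefer =
        (match pickLangBestP prefer 0 none d.items with
         | none => none
         | some (_, v) => v.head?) := by
  intro prefer
  induction prefer with
  | nil =>
    simpa [pickLangA1, PySem.Dict.values] using (pickLangBestP_nil d.items 0).symm
  | cons lang restp ih =>
    have hndi : (d.items.map (·.1)).Nodup := hnd
    by_cases hhit : ∃ v, d.get? lang = some v ∧ v ≠ []
    · obtain ⟨v, hget, hv⟩ := hhit
      have hmem : (lang, v) ∈ d.items := PySem.Dict.mem_items_of_get?_eq_some _ hget
      rw [pickLangBestP_hit lang restp v hv d.items 0 hndi hmem]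
      obtain ⟨x, xs, rfl⟩ : ∃ x xs, v = x :: xs := by
        cases v with
        | nil => exact absurd rfl hv
        | cons x xs => exact ⟨x, xs, rfl⟩
      simp [pickLangA1, hget]
    · have hfal : ∀ p ∈ d.items, p.1 = lang → p.2 = [] := by
        intro p hp hk
        obtain ⟨k, w⟩ := p
        simp only at hk
        have hget : d.get? lang = some w := by
          rw [← hk]; exact PySem.Dict.get?_of_mem_items _ hp hnd
        by_contra hw
        exact hhit ⟨w, hget, hw⟩
      have hshift := pickLangBestP_shift lang restp d.items hfal 0 none
      simp only [Option.map_none] at hshift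
      have hA1 : pickLangA1 d (lang :: restp) = pickLangA1 d restp := by
        simp only [pickLangA1]
        cases hget : d.get? lang with
        | none => rfl
        | some w =>
          cases w with
          | nil => rfl
          | cons x xs => exact absurd ⟨x :: xs, hget, by simp⟩ hhit
      rw [hA1, ih, hshift]
      cases pickLangBestP restp 0 none d.items with
      | none => rfl
      | some q => obtain ⟨r, v⟩ := q; rfl

-- ===== VERDICT (by name: the statement is the Claim_ definition above) =====
theorem pick_lang_py_spec : Claim_equal_pick_lang_py := by
  intro field prefer _
  unfold Spec_pick_lang_py pick_lang_py pick_lang_py_alt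
  cases field with
  | none => rfl
  | some pairs =>
    have hb := pickLangBest_eq_P prefer (PySem.Dict.ofList pairs).items 0 none
    have h := pickLang_main (PySem.Dict.ofList pairs) (PySem.Dict.nodup_keys_ofList pairs) prefer
    show pickLangA1 (PySem.Dict.ofList pairs) prefer =
      match pickLangBest (pickLangRankMap prefer) prefer.length 0 none
          (PySem.Dict.ofList pairs).items with
      | none => none
      | some (_, v) => v.head?
    rw [hb, h]
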